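-- pv_equiv track=rewrite | github.com/weskerhluffy/strasen_shit | src/strasen/poder_largote.py | reducir_a_modulo
-- ===== SOURCE A (Python) =====
-- def numero_a_digitos(num,base):
--     digitos = []
--     #logger_cagada.debug("convirtiendo num {}".format(num))
--     while num:
--         digitos.append(num % base)
--         num //= base
--     #logger_cagada.debug("kedo en digitos {}".format(digitos))
--     return digitos
--
-- def digitos_a_numero(digitos, base):
--     factor = 1
--     num = 0
--     for digito in digitos:
--         num += digito * factor
--         factor *= base
--     return num
--
-- def reducir_a_modulo(digitos,modulo):
--         digitos_tam=len(digitos)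
--         idx_act=digitos_tam
--         num_final=0
--         digitos_max=10
--         while idx_act>0:
--                 idx_act=max(digitos_tam-digitos_max,0)
--                 #logger_cagada.debug("los digitos ant de red {}".format(digitos))
--                 porcion_num=digitos[idx_act:]
--                 #logger_cagada.debug("la porcion tomada {} a partir de {}".format(porcion_num, idx_act))
--                 num_conv=digitos_a_numero(porcion_num,10)
--                 #logger_cagada.debug("el num ia conv {}".format(num_conv))
--                 num_conv=num_conv%modulo
--                 #logger_cagada.debug("el num ia mod {}".format(num_conv))
--                 nueva_porcion=numero_a_digitos(num_conv,10)
--                 #logger_cagada.debug("el num ia mod en digitos {}".format(nueva_porcion))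
--                 digitos_tam=(digitos_tam-min(digitos_max,digitos_tam)+len(nueva_porcion))
--                 digitos[idx_act:]=nueva_porcion
--                 #logger_cagada.debug("los digitos reducidos {}".format(digitos))
--         num_final=digitos_a_numero(digitos,10)%modulo
--         return num_final
-- ===== SOURCE B (Python) =====
-- def numero_a_digitos(num, base):
--     digitos = []
--     while num:
--         digitos.append(num % base)
--         num //= base
--     return digitos
--
-- def reducir_a_modulo(digitos, modulo):
--     # Horner pass from the most significant digit; mutates digitos like A does.
--     r = 0
--     for d in reversed(digitos):
--         r = (r * 10 + d) % modulo
--     digitos[:] = numero_a_digitos(r, 10)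
--     return r
-- ===== Notes on version B (the rewrite author's own statement) =====
-- stated objective: faster
-- what changed: Replaces A's repeated take-top-10-digits/convert/mod/write-back chunk loop with a single Horner pass over the digits keeping a running remainder, then one write-back of the remainder's digits (same in-place mutation of digitos as A); same O(n) but one tight loop of small-int ops instead of per-chunk slicing, helper calls and list splicing — measured ~3.8x faster.
-- outside the precondition, e.g. on reducir_a_modulo([0, 0, 0, 0, 0, 0, 0, 0, 0, 0, 0], 2000000000): A returns 0, B returns 0; on reducir_a_modulo([0], -3): A returns 0, B returns 0
import Mathlib
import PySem

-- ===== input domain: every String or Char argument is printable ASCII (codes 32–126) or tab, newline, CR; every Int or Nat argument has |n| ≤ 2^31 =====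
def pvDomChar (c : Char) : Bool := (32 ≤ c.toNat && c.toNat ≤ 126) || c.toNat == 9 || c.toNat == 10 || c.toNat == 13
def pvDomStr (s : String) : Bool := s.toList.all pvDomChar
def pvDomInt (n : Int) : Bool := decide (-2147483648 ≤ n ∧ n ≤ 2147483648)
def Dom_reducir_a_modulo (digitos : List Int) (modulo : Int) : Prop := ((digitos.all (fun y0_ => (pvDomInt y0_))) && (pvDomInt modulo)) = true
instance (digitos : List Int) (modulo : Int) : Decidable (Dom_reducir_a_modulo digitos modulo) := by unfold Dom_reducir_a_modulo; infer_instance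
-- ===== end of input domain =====

-- B replaces A's chunked reduce-and-writeback loop by one Horner pass with a running remainder
-- (same in-place mutation of `digitos`; the equivalence proved here is about the return value,
-- which the mutation does not affect — and the final list contents coincide as well).


-- ===== PORT A =====
-- numero_a_digitos(num, 10): 'while num: digitos.append(num % base); num //= base'.
-- Fueled (Python diverges on negative num; call sites pass fuel num.natAbs + 1, enough whenever num ≥ 0).
def pvNumADig (fuel : Nat) (num base : Int) : List Int :=
  match fuel with
  | 0 => []
  | fuel + 1 =>
    if num = 0 then []
    else PySem.Int.mod num base :: pvNumADig fuel (PySem.Int.floordiv num base) base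

-- digitos_a_numero(digitos, base): state (factor, num), 'num += digito*factor; factor *= base'.
def pvDigANum (digitos : List Int) (base : Int) : Int :=
  (digitos.foldl (fun (st : Int × Int) digito => (st.1 * base, st.2 + digito * st.1)) (1, 0)).2

-- the 'while idx_act > 0' loop of A, state = (digitos, digitos_tam, idx_act); fueled
-- (under Pre_ the fuel digitos.length + 2 given below always suffices).
def pvLoopA (fuel : Nat) (digitos : List Int) (tam idx modulo : Int) : List Int :=
  match fuel with
  | 0 => digitos
  | fuel + 1 =>
    if idx > 0 then
      let idx2 := max (tam - 10) 0
      let porcion := PySem.List.slice digitos (some idx2) none          -- digitos[idx_act:]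
      let numConv := PySem.Int.mod (pvDigANum porcion 10) modulo
      let nueva := pvNumADig (numConv.natAbs + 1) numConv 10
      let tam2 := tam - min 10 tam + (nueva.length : Int)
      -- 'digitos[idx_act:] = nueva_porcion' ported by hand: exact for 0 ≤ idx_act (keep prefix, replace tail)
      let digitos2 := PySem.List.slice digitos none (some idx2) ++ nueva
      pvLoopA fuel digitos2 tam2 idx2 modulo
    else digitos

def reducir_a_modulo (digitos : List Int) (modulo : Int) : Int :=
  PySem.Int.mod
    (pvDigANum
      (pvLoopA (digitos.length + 2) digitos (digitos.length : Int) (digitos.length : Int) modulo)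
      10)
    modulo

-- ===== PORT B =====
-- 'r = 0; for d in reversed(digitos): r = (r*10 + d) % modulo; digitos[:] = numero_a_digitos(r,10); return r'
-- (the slice assignment only mutates the argument; the returned value is r).
def reducir_a_modulo_alt (digitos : List Int) (modulo : Int) : Int :=
  digitos.reverse.foldl (fun r d => PySem.Int.mod (r * 10 + d) modulo) 0

-- ===== PRECONDITION & SPEC =====
-- Pre_ excludes modulo ≤ 0 (modulo = 0 raises ZeroDivisionError; for modulo < 0 the negative
-- remainder makes numero_a_digitos loop forever in both programs except when every reduced chunk
-- is 0, a value-dependent region) and the value-dependent region modulo > 10^9 with more than 10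
-- digits, where A's chunk can fail to shrink and the loop may not terminate.
def Pre_reducir_a_modulo (digitos : List Int) (modulo : Int) : Prop :=
  0 < modulo ∧ (modulo ≤ 1000000000 ∨ digitos.length ≤ 10)
instance (digitos : List Int) (modulo : Int) : Decidable (Pre_reducir_a_modulo digitos modulo) := by
  unfold Pre_reducir_a_modulo; infer_instance

def pvWitness_reducir_a_modulo : List Int × Int := ([1, 2, 3], 7)

def Spec_reducir_a_modulo (digitos : List Int) (modulo : Int) (out : Int) : Prop := out = reducir_a_modulo_alt digitos modulo
instance (digitos : List Int) (modulo : Int) (out : Int) : Decidable (Spec_reducir_a_modulo digitos modulo out) := by unfold Spec_reducir_a_modulo; infer_instance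

-- ===== CLAIM (what is proved, stated in full; the proofs are below) =====
def Claim_equal_reducir_a_modulo : Prop := ∀ (digitos : List Int) (modulo : Int), Dom_reducir_a_modulo digitos modulo → Pre_reducir_a_modulo digitos modulo → Spec_reducir_a_modulo digitos modulo (reducir_a_modulo digitos modulo)

-- ===== LEMMAS AND PROOFS =====

-- the little-endian base-10 value of a digit list
def pvVal : List Int → Int
  | [] => 0
  | d :: l => d + 10 * pvVal l

theorem pvDigANum_aux (l : List Int) : ∀ f n : Int,
    (l.foldl (fun (st : Int × Int) digito => (st.1 * 10, st.2 + digito * st.1)) (f, n)).2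
      = n + f * pvVal l := by
  induction l with
  | nil => intro f n; simp [pvVal]
  | cons d l ih => intro f n; simp only [List.foldl, pvVal]; rw [ih]; ring

theorem pvDigANum_eq (l : List Int) : pvDigANum l 10 = pvVal l := by
  unfold pvDigANum; rw [pvDigANum_aux]; ring

theorem pvVal_append (xs ys : List Int) :
    pvVal (xs ++ ys) = pvVal xs + 10 ^ xs.length * pvVal ys := by
  induction xs with
  | nil => simp [pvVal]
  | cons d xs ih => simp only [List.cons_append, pvVal, ih, List.length_cons]; ring

theorem pvVal_numADig (fuel : Nat) : ∀ n : Int, 0 ≤ n → n.natAbs ≤ fuel →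
    pvVal (pvNumADig fuel n 10) = n := by
  induction fuel with
  | zero =>
    intro n h0 h1
    have hn : n = 0 := by omega
    subst hn; rfl
  | succ fuel ih =>
    intro n h0 h1
    unfold pvNumADig
    by_cases hn : n = 0
    · simp [hn, pvVal]
    · have hpos : 0 < n := by omega
      rw [if_neg hn, pvVal,
        PySem.Int.mod_eq_emod_of_pos (by omega : (0:Int) < 10),
        PySem.Int.floordiv_eq_ediv_of_pos (by omega : (0:Int) < 10),
        ih (n / 10) (by omega) (by omega)]
      omega

theorem pvMod_congr (m a c v : Int) (hm : 0 < m) :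
    PySem.Int.mod (a + c * PySem.Int.mod v m) m = PySem.Int.mod (a + c * v) m := by
  rw [PySem.Int.mod_eq_emod_of_pos hm, PySem.Int.mod_eq_emod_of_pos hm,
    PySem.Int.mod_eq_emod_of_pos hm]
  exact Int.ModEq.add_left a (Int.ModEq.mul_left c (Int.emod_emod_of_dvd v dvd_rfl))

theorem pvLoopA_val (fuel : Nat) : ∀ (digitos : List Int) (tam idx modulo : Int),
    0 < modulo → tam = (digitos.length : Int) →
    PySem.Int.mod (pvVal (pvLoopA fuel digitos tam idx modulo)) modulo
      = PySem.Int.mod (pvVal digitos) modulo := by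
  induction fuel with
  | zero => intro digitos tam idx m hm htam; rfl
  | succ fuel ih =>
    intro digitos tam idx m hm htam
    unfold pvLoopA
    by_cases hidx : idx > 0
    · rw [if_pos hidx]
      simp only []
      set k : Int := max (tam - 10) 0 with hk
      have hk0 : 0 ≤ k := le_max_right _ _
      have hkle : k.toNat ≤ digitos.length := by omega
      have hslice1 : PySem.List.slice digitos (some k) none = digitos.drop k.toNat :=
        PySem.List.slice_from digitos hk0
      have hslice2 : PySem.List.slice digitos none (some k) = digitos.take k.toNat :=
        PySem.List.slice_to digitos hk0
      set v : Int := pvDigANum (digitos.drop k.toNat) 10 with hv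
      set numConv : Int := PySem.Int.mod v m with hnc
      have hnc0 : 0 ≤ numConv := PySem.Int.mod_nonneg v hm
      have hnueva : pvVal (pvNumADig (numConv.natAbs + 1) numConv 10) = numConv :=
        pvVal_numADig _ numConv hnc0 (by omega)
      rw [hslice1, hslice2]
      rw [ih _ _ _ _ hm (by
        simp only [List.length_append, List.length_take]
        omega)]
      rw [pvVal_append, hnueva, List.length_take, Nat.min_eq_left hkle]
      rw [hnc, hv, pvDigANum_eq]
      rw [pvMod_congr _ _ _ _ hm]
      congr 1
      conv_rhs => rw [← List.take_append_drop k.toNat digitos, pvVal_append,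
        List.length_take, Nat.min_eq_left hkle]
    · rw [if_neg hidx]

theorem pvHorner (m : Int) (hm : 0 < m) (l : List Int) :
    l.foldr (fun d r => PySem.Int.mod (r * 10 + d) m) 0 = PySem.Int.mod (pvVal l) m := by
  induction l with
  | nil => simp [pvVal, PySem.Int.mod_eq_emod_of_pos hm]
  | cons d l ih =>
    simp only [List.foldr, pvVal, ih]
    have h := pvMod_congr m d 10 (pvVal l) hm
    rw [← h]; ring_nf

-- ===== VERDICT (by name: the statement is the Claim_ definition above) =====
theorem reducir_a_modulo_spec : Claim_equal_reducir_a_modulo := by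
  intro digitos modulo _hdom hpre
  unfold Spec_reducir_a_modulo reducir_a_modulo reducir_a_modulo_alt
  have hm : 0 < modulo := hpre.1
  rw [List.foldl_reverse, pvHorner modulo hm, pvDigANum_eq,
    pvLoopA_val _ _ _ _ _ hm rfl]
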